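-- pv_equiv track=rewrite | github.com/zmd9220/algorithm_python | baekjoon_python/단계 7 함수/# 1065 한수.py | hans
-- ===== SOURCE A (Python) =====
-- def hans(ans, n):
--     if n < 99:
--         ans = n
--     else:
--         lst = list()
--         for i in range(1, n+1):
--             if i == 1000:
--                 break
--             if i < 100:
--                 ans += 1
--                 continue
--             else:
--                 tmp = i
--                 while tmp > 0:
--                     lst.append(tmp % 10)
--                     tmp = int(tmp / 10)
--                 if (lst[1]-lst[0] == lst[2]-lst[1]):
--                     ans += 1
--                 lst.clear()
--     return ans
-- ===== SOURCE B (Python) =====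
-- def hans(ans, n):
--     if n < 99:
--         return n
--     m = min(n, 999)
--     count = 99  # every 1..99 is a hansu
--     # a three-digit hansu is exactly 111*a + 12*d for a digit pattern (a, a+d, a+2*d)
--     for a in range(1, 10):
--         for d in range(-9, 10):
--             if 0 <= a + d <= 9 and 0 <= a + 2 * d <= 9 and 111 * a + 12 * d <= m:
--                 count += 1
--     return ans + count
-- ===== Notes on version B (the rewrite author's own statement) =====
-- stated objective: alternative
-- what changed: B never inspects the numbers 1..n: it returns n for n<99, otherwise counts 1..99 as the constant 99 and enumerates the 9x19 digit patterns (first digit a, common difference d) of three-digit arithmetic-progression numbers, counting patterns whose value 111*a+12*d is at most min(n,999); A scans every i up to min(n,1000) extracting digits into a list.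
import Mathlib
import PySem

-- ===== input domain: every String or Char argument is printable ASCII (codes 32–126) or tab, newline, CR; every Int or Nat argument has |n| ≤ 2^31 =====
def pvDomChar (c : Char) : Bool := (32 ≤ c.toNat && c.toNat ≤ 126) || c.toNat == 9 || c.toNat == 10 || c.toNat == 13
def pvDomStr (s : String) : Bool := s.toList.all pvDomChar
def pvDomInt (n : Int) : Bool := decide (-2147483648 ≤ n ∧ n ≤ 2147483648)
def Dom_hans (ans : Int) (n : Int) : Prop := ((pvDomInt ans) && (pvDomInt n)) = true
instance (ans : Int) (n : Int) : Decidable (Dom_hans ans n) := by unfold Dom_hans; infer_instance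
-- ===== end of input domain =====

-- B replaces A's scan of every number up to min(n,1000) by a constant-size enumeration of
-- the 9×19 digit patterns (first digit, common difference) of three-digit hansu (objective: alternative).

-- ===== PORT A =====
-- the inner 'while tmp > 0' digit loop; int(tmp/10) = floor division since tmp > 0 here
def pyDigits (tmp : Int) (lst : List Int) : List Int :=
  if _h : tmp > 0 then
    pyDigits (PySem.Int.floordiv tmp 10) (lst ++ [PySem.Int.mod tmp 10])
  else lst
termination_by tmp.toNat
decreasing_by
  rw [PySem.Int.floordiv_eq_ediv_of_pos (by norm_num : (0:Int) < 10)]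
  omega

-- the 'for i in range(1, n+1)' loop with its 'if i == 1000: break'; fuel 1000 is never
-- exhausted since the loop breaks at i = 1000 (a totality guard, not an algorithm switch).
-- lst[k] is pyGetD …; for the i ≥ 100 branch the list always has 3 elements, so no IndexError.
def hansLoop : Nat → Int → Int → Int → Int
  | 0, _, _, ans => ans
  | fuel+1, i, n, ans =>
    if i > n then ans
    else if i = 1000 then ans
    else if i < 100 then hansLoop fuel (i+1) n (ans + 1)
    else
      let lst := pyDigits i []
      let ans' := if PySem.List.pyGetD lst 1 0 - PySem.List.pyGetD lst 0 0
                     = PySem.List.pyGetD lst 2 0 - PySem.List.pyGetD lst 1 0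
                  then ans + 1 else ans
      hansLoop fuel (i+1) n ans'

def hans (ans : Int) (n : Int) : Int :=
  if n < 99 then n else hansLoop 1000 1 n ans

-- ===== PORT B =====
def hans_alt (ans : Int) (n : Int) : Int :=
  if n < 99 then n
  else
    let m := min n 999
    let count := (PySem.List.pyRange 1 10 1).foldl (fun count a =>
      (PySem.List.pyRange (-9) 10 1).foldl (fun count d =>
        if 0 ≤ a + d ∧ a + d ≤ 9 ∧ 0 ≤ a + 2*d ∧ a + 2*d ≤ 9 ∧ 111*a + 12*d ≤ m
        then count + 1 else count) count) 99
    ans + count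

-- ===== PRECONDITION & SPEC =====
def Spec_hans (ans : Int) (n : Int) (out : Int) : Prop := out = hans_alt ans n
instance (ans : Int) (n : Int) (out : Int) : Decidable (Spec_hans ans n out) := by unfold Spec_hans; infer_instance

-- ===== CLAIM =====
def Claim_equal_hans : Prop := ∀ (ans : Int) (n : Int), Dom_hans ans n → Spec_hans ans n (hans ans n)

-- ===== LEMMAS AND PROOFS =====

-- A's per-iteration contribution as a function of i (valid for 1 ≤ i ≤ 999)
def gA (i : Int) : Int :=
  if i < 100 then 1
  else if PySem.List.pyGetD (pyDigits i []) 1 0 - PySem.List.pyGetD (pyDigits i []) 0 0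
          = PySem.List.pyGetD (pyDigits i []) 2 0 - PySem.List.pyGetD (pyDigits i []) 1 0
       then 1 else 0

-- the three-digit part of A's count
def sumA (m : Int) : Int := ((PySem.List.pyRange 100 (m+1) 1).map gA).sum

-- B's per-first-digit pattern counts (≤ m, and exactly = v)
def cntLe (a m : Int) : Int :=
  ((PySem.List.pyRange (-9) 10 1).countP
    (fun d => decide (0 ≤ a + d ∧ a + d ≤ 9 ∧ 0 ≤ a + 2*d ∧ a + 2*d ≤ 9 ∧ 111*a + 12*d ≤ m)) : Int)

def cntEq (a v : Int) : Int :=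
  ((PySem.List.pyRange (-9) 10 1).countP
    (fun d => decide (0 ≤ a + d ∧ a + d ≤ 9 ∧ 0 ≤ a + 2*d ∧ a + 2*d ≤ 9 ∧ 111*a + 12*d = v)) : Int)

def sumB (m : Int) : Int := ((PySem.List.pyRange 1 10 1).map (fun a => cntLe a m)).sum

lemma pyDigits_pos (tmp : Int) (lst : List Int) (h : 0 < tmp) :
    pyDigits tmp lst = pyDigits (PySem.Int.floordiv tmp 10) (lst ++ [PySem.Int.mod tmp 10]) := by
  rw [pyDigits]; simp [h]

lemma pyDigits_nonpos (tmp : Int) (lst : List Int) (h : ¬ 0 < tmp) :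
    pyDigits tmp lst = lst := by
  rw [pyDigits]; simp [h]

lemma hansLoop_eq_sum (fuel : Nat) :
    ∀ (i ans n : Int), 1 ≤ i → i ≤ 1000 → min (n+1) 1000 - i ≤ (fuel : Int) →
    hansLoop fuel i n ans = ans + ((PySem.List.pyRange i (min (n+1) 1000) 1).map gA).sum := by
  induction fuel with
  | zero =>
    intro i ans n _ _ hf
    rw [PySem.List.pyRange_one_eq_nil (by omega)]
    simp [hansLoop]
  | succ fuel ih =>
    intro i ans n h1 h2 hf
    rw [hansLoop]
    by_cases hgt : i > n
    · rw [if_pos hgt, PySem.List.pyRange_one_eq_nil (by omega)]; simp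
    · rw [if_neg hgt]
      by_cases h1000 : i = 1000
      · rw [if_pos h1000, PySem.List.pyRange_one_eq_nil (by omega)]; simp
      · rw [if_neg h1000]
        have hlt : i < min (n+1) 1000 := by omega
        rw [PySem.List.pyRange_one_cons hlt, List.map_cons, List.sum_cons]
        by_cases hsm : i < 100
        · rw [if_pos hsm, ih (i+1) (ans+1) n (by omega) (by omega) (by omega)]
          have : gA i = 1 := by unfold gA; rw [if_pos hsm]
          rw [this]; ring
        · rw [if_neg hsm]
          rw [ih (i+1) _ n (by omega) (by omega) (by omega)]
          have : gA i = if PySem.List.pyGetD (pyDigits i []) 1 0 - PySem.List.pyGetD (pyDigits i []) 0 0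
              = PySem.List.pyGetD (pyDigits i []) 2 0 - PySem.List.pyGetD (pyDigits i []) 1 0
            then 1 else 0 := by unfold gA; rw [if_neg hsm]
          rw [this]
          split_ifs <;> ring

set_option maxRecDepth 4000 in
lemma sum_small : (((PySem.List.pyRange 1 100 1).map gA).sum : Int) = 99 := by decide

-- pyDigits on a three-digit i, in closed form
lemma pyDigits_eq (i : Int) (h1 : 100 ≤ i) (h2 : i ≤ 999) :
    pyDigits i [] = [PySem.Int.mod i 10,
                     PySem.Int.mod (PySem.Int.floordiv i 10) 10,
                     PySem.Int.floordiv i 100] := by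
  have h10 : (0:Int) < 10 := by norm_num
  have e1 : PySem.Int.floordiv i 10 = i / 10 := PySem.Int.floordiv_eq_ediv_of_pos h10
  have e2 : PySem.Int.floordiv (i / 10) 10 = (i / 10) / 10 := PySem.Int.floordiv_eq_ediv_of_pos h10
  have e3 : PySem.Int.floordiv i 100 = i / 100 := PySem.Int.floordiv_eq_ediv_of_pos (by norm_num)
  have m3 : PySem.Int.mod ((i / 10) / 10) 10 = ((i / 10) / 10) % 10 := PySem.Int.mod_eq_emod_of_pos h10
  have b1 : (0:Int) < i / 10 := by omega
  have b2 : (0:Int) < (i / 10) / 10 := by omega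
  have b3 : ¬ (0:Int) < ((i / 10) / 10) / 10 := by omega
  rw [pyDigits_pos _ _ (by omega), e1,
      pyDigits_pos _ _ b1, e2,
      pyDigits_pos _ _ b2,
      pyDigits_nonpos _ _ (by rw [PySem.Int.floordiv_eq_ediv_of_pos h10]; exact b3)]
  simp only [List.nil_append, List.cons_append]
  rw [e3, m3]
  simp only [List.cons.injEq, and_true]
  exact ⟨trivial, trivial, by omega⟩

-- gA in kernel-computable form (pyDigits is well-founded recursion, which 'decide' cannot unfold)
def gA' (i : Int) : Int :=
  if i < 100 then 1
  else if (i / 10) % 10 - i % 10 = i / 100 - (i / 10) % 10 then 1 else 0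

lemma gA_eq_gA' (i : Int) (h1 : 100 ≤ i) (h2 : i ≤ 999) : gA i = gA' i := by
  unfold gA gA'
  rw [if_neg (show ¬ i < 100 by omega), if_neg (show ¬ i < 100 by omega), pyDigits_eq i h1 h2]
  have h10 : (0:Int) < 10 := by norm_num
  have g0 : PySem.List.pyGetD [PySem.Int.mod i 10, PySem.Int.mod (PySem.Int.floordiv i 10) 10, PySem.Int.floordiv i 100] 0 0 = PySem.Int.mod i 10 := by
    simp [PySem.List.pyGetD, PySem.List.pyGet?, PySem.List.pyIdx?]
  have g1 : PySem.List.pyGetD [PySem.Int.mod i 10, PySem.Int.mod (PySem.Int.floordiv i 10) 10, PySem.Int.floordiv i 100] 1 0 = PySem.Int.mod (PySem.Int.floordiv i 10) 10 := by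
    simp [PySem.List.pyGetD, PySem.List.pyGet?, PySem.List.pyIdx?]
  have g2 : PySem.List.pyGetD [PySem.Int.mod i 10, PySem.Int.mod (PySem.Int.floordiv i 10) 10, PySem.Int.floordiv i 100] 2 0 = PySem.Int.floordiv i 100 := by
    simp [PySem.List.pyGetD, PySem.List.pyGet?, PySem.List.pyIdx?]
  rw [g0, g1, g2,
      PySem.Int.floordiv_eq_ediv_of_pos h10,
      PySem.Int.floordiv_eq_ediv_of_pos (show (0:Int) < 100 by norm_num),
      PySem.Int.mod_eq_emod_of_pos h10, PySem.Int.mod_eq_emod_of_pos h10]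

-- splitting a countP at the new bound
lemma countP_split (l : List Int) (P Q R : Int → Prop)
    [DecidablePred P] [DecidablePred Q] [DecidablePred R]
    (h : ∀ x, (P x ↔ Q x ∨ R x) ∧ ¬ (Q x ∧ R x)) :
    l.countP (fun x => decide (P x)) = l.countP (fun x => decide (Q x)) + l.countP (fun x => decide (R x)) := by
  induction l with
  | nil => simp
  | cons x xs ih =>
    simp only [List.countP_cons, ih]
    obtain ⟨h1, h2⟩ := h x
    by_cases hq : Q x <;> by_cases hr : R x <;> by_cases hp : P x <;> simp_all <;> omega

lemma cntLe_succ (a m : Int) : cntLe a (m+1) = cntLe a m + cntEq a (m+1) := by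
  unfold cntLe cntEq
  rw [countP_split _
    (fun d => 0 ≤ a + d ∧ a + d ≤ 9 ∧ 0 ≤ a + 2*d ∧ a + 2*d ≤ 9 ∧ 111*a + 12*d ≤ m+1)
    (fun d => 0 ≤ a + d ∧ a + d ≤ 9 ∧ 0 ≤ a + 2*d ∧ a + 2*d ≤ 9 ∧ 111*a + 12*d ≤ m)
    (fun d => 0 ≤ a + d ∧ a + d ≤ 9 ∧ 0 ≤ a + 2*d ∧ a + 2*d ≤ 9 ∧ 111*a + 12*d = m+1)
    (by intro x; omega)]
  push_cast; ring

-- B's pattern counting is exact for each single three-digit value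
set_option maxRecDepth 8000 in
set_option maxHeartbeats 4000000 in
lemma gA'_eq_cntEq : ∀ k : Nat, k < 900 →
    gA' (100 + (k:Int)) = ((PySem.List.pyRange 1 10 1).map (fun a => cntEq a (100 + (k:Int)))).sum := by
  decide

lemma sumB_succ (m : Int) (h1 : (100:Int) ≤ m + 1) (h2 : m + 1 ≤ 999) :
    sumB (m+1) = sumB m + gA' (m+1) := by
  unfold sumB
  have hk : ∃ k : Nat, k < 900 ∧ m + 1 = 100 + (k:Int) := ⟨(m - 99).toNat, by omega, by omega⟩
  obtain ⟨k, hk1, hk2⟩ := hk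
  rw [hk2, gA'_eq_cntEq k hk1]
  have hpt : ∀ a : Int, cntLe a (100 + (k:Int)) = cntLe a (99 + (k:Int)) + cntEq a (100 + (k:Int)) := by
    intro a
    have := cntLe_succ a (99 + (k:Int))
    rw [show (99:Int) + k + 1 = 100 + k by ring] at this
    exact this
  have hrw : ((PySem.List.pyRange 1 10 1).map (fun a => cntLe a (100 + (k:Int)))).sum
      = ((PySem.List.pyRange 1 10 1).map (fun a => cntLe a (99 + (k:Int)))).sum
      + ((PySem.List.pyRange 1 10 1).map (fun a => cntEq a (100 + (k:Int)))).sum := by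
    induction (PySem.List.pyRange 1 10 1) with
    | nil => simp
    | cons x xs ih => simp only [List.map_cons, List.sum_cons, ih, hpt x]; ring
  rw [hrw, show m = 99 + (k:Int) by omega]

lemma sumB_base : sumB 99 = 0 := by decide

lemma sumA_eq_sumB : ∀ k : Nat, k ≤ 900 → sumA (99 + (k:Int)) = sumB (99 + (k:Int)) := by
  intro k
  induction k with
  | zero =>
    intro _
    unfold sumA
    rw [PySem.List.pyRange_one_eq_nil (by omega)]
    simp [sumB_base]
  | succ k ih =>
    intro hk
    have hm : (99:Int) + (k+1:Nat) = (99 + (k:Int)) + 1 := by push_cast; ring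
    rw [hm]
    unfold sumA
    rw [show (99 + (k:Int)) + 1 + 1 = (99 + (k:Int) + 1) + 1 by ring,
        PySem.List.pyRange_one_succ_right (by omega), List.map_append, List.sum_append]
    have hA : sumA (99 + (k:Int)) = ((PySem.List.pyRange 100 (99 + (k:Int) + 1) 1).map gA).sum := rfl
    have hg : gA (99 + (k:Int) + 1) = gA' (99 + (k:Int) + 1) := by
      apply gA_eq_gA' <;> (push_cast at hk ⊢; omega)
    rw [← hA, ih (by omega),
        sumB_succ (99 + (k:Int)) (by omega) (by push_cast at hk ⊢; omega)]
    simp [hg]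

-- B's nested fold as 99 + sumB
lemma hans_alt_fold (m : Int) :
    (PySem.List.pyRange 1 10 1).foldl (fun count a =>
      (PySem.List.pyRange (-9) 10 1).foldl (fun count d =>
        if 0 ≤ a + d ∧ a + d ≤ 9 ∧ 0 ≤ a + 2*d ∧ a + 2*d ≤ 9 ∧ 111*a + 12*d ≤ m
        then count + 1 else count) count) 99 = 99 + sumB m := by
  have hfun : ∀ (c : Int), ∀ a ∈ PySem.List.pyRange 1 10 1,
      (PySem.List.pyRange (-9) 10 1).foldl (fun count d =>
        if 0 ≤ a + d ∧ a + d ≤ 9 ∧ 0 ≤ a + 2*d ∧ a + 2*d ≤ 9 ∧ 111*a + 12*d ≤ m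
        then count + 1 else count) c = c + cntLe a m := by
    intro c a _
    rw [PySem.List.foldl_ite_add_one
      (p := fun d => 0 ≤ a + d ∧ a + d ≤ 9 ∧ 0 ≤ a + 2*d ∧ a + 2*d ≤ 9 ∧ 111*a + 12*d ≤ m)]
    rfl
  rw [PySem.List.foldl_congr_mem (PySem.List.pyRange 1 10 1) _ (fun c a => c + cntLe a m) 99 hfun,
      PySem.List.foldl_add]
  rfl

lemma hans_alt_eq (ans n : Int) (hn : ¬ n < 99) :
    hans_alt ans n = ans + (99 + sumB (min n 999)) := by
  unfold hans_alt
  rw [if_neg hn]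
  show ans + ((PySem.List.pyRange 1 10 1).foldl (fun count a =>
      (PySem.List.pyRange (-9) 10 1).foldl (fun count d =>
        if 0 ≤ a + d ∧ a + d ≤ 9 ∧ 0 ≤ a + 2*d ∧ a + 2*d ≤ 9 ∧ 111*a + 12*d ≤ min n 999
        then count + 1 else count) count) 99) = _
  rw [hans_alt_fold (min n 999)]

-- ===== VERDICT =====
theorem hans_spec : Claim_equal_hans := by
  unfold Claim_equal_hans Spec_hans
  intro ans n _
  by_cases hn : n < 99
  · unfold hans hans_alt
    simp [hn]
  · unfold hans
    rw [if_neg hn, hans_alt_eq ans n hn]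
    rw [hansLoop_eq_sum 1000 1 ans n (by omega) (by omega) (by push_cast; omega)]
    rw [PySem.List.pyRange_one_append 1 100 (min (n+1) 1000) (by omega) (by omega),
        List.map_append, List.sum_append, sum_small]
    have hS : ((PySem.List.pyRange 100 (min (n+1) 1000) 1).map gA).sum = sumA (min n 999) := by
      unfold sumA
      rw [show min n 999 + 1 = min (n+1) 1000 by omega]
    rw [hS]
    have hk : ∃ k : Nat, k ≤ 900 ∧ min n 999 = 99 + (k:Int) :=
      ⟨(min n 999 - 99).toNat, by omega, by omega⟩
    obtain ⟨k, hk1, hk2⟩ := hk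
    rw [hk2, sumA_eq_sumB k hk1]
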